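-- pv_equiv track=rewrite | github.com/Chiki1601/Leetcode-Solution-in-Python | 2162.py | minCostSetTime
-- ===== SOURCE A (Python) =====
-- def minCostSetTime(startAt, moveCost, pushCost, targetSeconds):
--     """
--     :type startAt: int
--     :type moveCost: int
--     :type pushCost: int
--     :type targetSeconds: int
--     :rtype: int
--     """
--     def cost(s):
--         result = 0
--         if startAt == int(s[0]):
--             result += 0
--         else:
--             result += moveCost
--         result += pushCost
--         for i in range(1, len(s)):
--             if s[i - 1] == s[i]:
--                 result += pushCost
--             else:
--                 result += moveCost
--                 result += pushCost
--         return result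
--
--     M = targetSeconds // 60
--     nums = []
--     for i in range(M , -1, -1):
--         if targetSeconds - i * 60 < 100:
--             a = str(i)
--             b = str(targetSeconds - i * 60)
--             if b == '0':
--                 r = a + '00'
--             elif len(b) == 1:
--                 r = a + '0' + b
--             else:
--                 r = a + b
--             if len(r)<=4:
--                 nums.append(r.lstrip('0'))
--         else:
--             break
--     result = float('inf')
--
--     for r in nums:
--         result = min(result, cost(r))
--     return result
-- ===== SOURCE B (Python) =====
-- def minCostSetTime(startAt, moveCost, pushCost, targetSeconds):
--     """Exhaustive scan of all 10000 possible displays mmss instead of deriving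
--     candidates from targetSeconds; cost computed as pushCost*len + moveCost*changes."""
--     best = None
--     for n in range(10000):
--         if (n // 100) * 60 + n % 100 != targetSeconds:
--             continue
--         digits = [n // 1000, n // 100 % 10, n // 10 % 10, n % 10]
--         while digits and digits[0] == 0:
--             digits.pop(0)
--         changes = sum(1 for p, c in zip([startAt] + digits, digits) if p != c)
--         c = pushCost * len(digits) + moveCost * changes
--         if best is None or c < best:
--             best = c
--     return float('inf') if best is None else best
-- ===== Notes on version B (the rewrite author's own statement) =====
-- stated objective: alternative
-- what changed: Instead of deriving the 1-2 valid displays from targetSeconds by a descending minute loop with string building, B exhaustively scans all 10000 possible 4-digit displays mmss, keeps those whose total seconds equal targetSeconds, and computes each cost by the closed count pushCost*len(digits) + moveCost*(number of digit changes from startAt); it trades a derivation loop for a uniform brute-force filter.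
-- outside the precondition, e.g. on minCostSetTime(1, 2, 3, -5): A returns inf, B returns inf; on minCostSetTime(1, 2, 3, 6040): A returns inf, B returns inf; on minCostSetTime(1, 2, 3, 0): A raises IndexError, B returns 0
import Mathlib
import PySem

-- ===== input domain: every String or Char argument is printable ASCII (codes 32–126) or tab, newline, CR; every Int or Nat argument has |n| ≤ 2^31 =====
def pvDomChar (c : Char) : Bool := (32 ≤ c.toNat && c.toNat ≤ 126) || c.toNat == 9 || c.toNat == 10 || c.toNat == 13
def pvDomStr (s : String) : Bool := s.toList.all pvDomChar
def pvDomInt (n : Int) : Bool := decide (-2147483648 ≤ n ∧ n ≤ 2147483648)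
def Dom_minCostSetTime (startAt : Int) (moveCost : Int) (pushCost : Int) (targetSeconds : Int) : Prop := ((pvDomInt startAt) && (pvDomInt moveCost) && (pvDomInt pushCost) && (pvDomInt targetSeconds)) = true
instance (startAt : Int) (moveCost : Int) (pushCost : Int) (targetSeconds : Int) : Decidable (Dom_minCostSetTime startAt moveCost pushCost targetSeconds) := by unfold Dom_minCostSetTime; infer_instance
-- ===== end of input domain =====

-- B replaces A's derivation of candidate displays from targetSeconds (descending minute loop,
-- string building, lstrip) by an exhaustive scan of all 10000 displays mmss with a closed
-- change-count cost (objective: alternative).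

-- ===== PORT A =====
-- the 'for i in range(1, len(s))' body of cost, over adjacent characters
def pvCostTailA (moveCost pushCost : Int) : List Char → Int
  | a :: b :: rest => (if a = b then pushCost else moveCost + pushCost) + pvCostTailA moveCost pushCost (b :: rest)
  | _ => 0

-- cost(s); 's[0]' raises IndexError on the empty string — that happens only for targetSeconds = 0, excluded by Pre_
def pvCostA (startAt moveCost pushCost : Int) (s : List Char) : Int :=
  (if startAt = (PySem.Int.ofChars? (match s with | [] => [] | c :: _ => [c])).getD 0 then 0 else moveCost)
  + pushCost + pvCostTailA moveCost pushCost s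

-- the r built from a = str(i) and b = str(targetSeconds - i*60)
def pvRA (a b : List Char) : List Char :=
  if b = ['0'] then a ++ ['0', '0']
  else if b.length = 1 then a ++ '0' :: b
  else a ++ b

-- one iteration of the 'for i in range(M, -1, -1)' loop; the flag is Python's 'break'
def pvBodyA (targetSeconds : Int) (st : List (List Char) × Bool) (i : Int) : List (List Char) × Bool :=
  if st.2 then st else
  if targetSeconds - i * 60 < 100 then
    let r := pvRA (PySem.Int.toChars i) (PySem.Int.toChars (targetSeconds - i * 60))
    -- r.lstrip('0') = dropWhile (· == '0'): exact, stripping the single character '0' from the left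
    if r.length ≤ 4 then (st.1 ++ [r.dropWhile (· == '0')], st.2) else st
  else (st.1, true)

def pvBuildNumsA (targetSeconds : Int) : List (List Char) :=
  ((PySem.List.pyRange (PySem.Int.floordiv targetSeconds 60) (-1) (-1)).foldl
    (pvBodyA targetSeconds) ([], false)).1

def minCostSetTime (startAt : Int) (moveCost : Int) (pushCost : Int) (targetSeconds : Int) : Int :=
  -- result = float('inf') then running min over ints: Option Int with none = inf;
  -- '.getD 0' is only reached when nums is empty (A then returns the float inf) — excluded by Pre_
  ((pvBuildNumsA targetSeconds).foldl
    (fun (acc : Option Int) r =>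
      match acc with
      | none => some (pvCostA startAt moveCost pushCost r)
      | some v => some (min v (pvCostA startAt moveCost pushCost r))) none).getD 0

-- ===== PORT B =====
-- digits = [n//1000, n//100%10, n//10%10, n%10] followed by the leading-zero popping while-loop
def pvDigits4 (n : Int) : List Int :=
  [PySem.Int.floordiv n 1000, PySem.Int.mod (PySem.Int.floordiv n 100) 10,
   PySem.Int.mod (PySem.Int.floordiv n 10) 10, PySem.Int.mod n 10].dropWhile (· == 0)

-- changes = sum(1 for p, c in zip([startAt] + digits, digits) if p != c)
def pvChangesB (startAt : Int) (ds : List Int) : Int :=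
  (((startAt :: ds).zip ds).countP (fun p => p.1 != p.2) : Nat)

-- one iteration of 'for n in range(10000)' (the 'continue' is the else-branch)
def pvBodyB (sa mc pc ts : Int) (best : Option Int) (n : Int) : Option Int :=
  if PySem.Int.floordiv n 100 * 60 + PySem.Int.mod n 100 = ts then
    let ds := pvDigits4 n
    let c := pc * (ds.length : Int) + mc * pvChangesB sa ds
    match best with
    | none => some c
    | some b => if c < b then some c else some b
  else best

def minCostSetTime_alt (startAt : Int) (moveCost : Int) (pushCost : Int) (targetSeconds : Int) : Int :=
  -- best = None is the float('inf') branch, only reached outside Pre_; '.getD 0' unreachable there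
  ((PySem.List.pyRange 0 10000 1).foldl (pvBodyB startAt moveCost pushCost targetSeconds) none).getD 0

-- ===== PRECONDITION & SPEC =====
-- Pre_ excludes targetSeconds = 0 (A's cost('') raises IndexError) and targetSeconds < 0 or > 6039
-- (A's candidate list is empty there and it returns the float inf, not an int).
def Pre_minCostSetTime (startAt : Int) (moveCost : Int) (pushCost : Int) (targetSeconds : Int) : Prop :=
  1 ≤ targetSeconds ∧ targetSeconds ≤ 6039
instance (startAt : Int) (moveCost : Int) (pushCost : Int) (targetSeconds : Int) : Decidable (Pre_minCostSetTime startAt moveCost pushCost targetSeconds) := by unfold Pre_minCostSetTime; infer_instance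

def pvWitness_minCostSetTime : Int × Int × Int × Int := (1, 2, 3, 60)

def Spec_minCostSetTime (startAt : Int) (moveCost : Int) (pushCost : Int) (targetSeconds : Int) (out : Int) : Prop := out = minCostSetTime_alt startAt moveCost pushCost targetSeconds
instance (startAt : Int) (moveCost : Int) (pushCost : Int) (targetSeconds : Int) (out : Int) : Decidable (Spec_minCostSetTime startAt moveCost pushCost targetSeconds out) := by unfold Spec_minCostSetTime; infer_instance

-- ===== CLAIM (what is proved, stated in full; the proofs are below) =====
def Claim_equal_minCostSetTime : Prop := ∀ (startAt : Int) (moveCost : Int) (pushCost : Int) (targetSeconds : Int), Dom_minCostSetTime startAt moveCost pushCost targetSeconds → Pre_minCostSetTime startAt moveCost pushCost targetSeconds → Spec_minCostSetTime startAt moveCost pushCost targetSeconds (minCostSetTime startAt moveCost pushCost targetSeconds)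
-- ===== LEMMAS AND PROOFS =====
-- (everything below is proof-only machinery)

def pvDigitChar (d : Int) : Char := Char.ofNat (48 + d.toNat)

-- digit list of a candidate pair (m, s), as A's strip produces it
def pvDigitsB (m s : Int) : List Int :=
  [PySem.Int.floordiv m 10, PySem.Int.mod m 10,
   PySem.Int.floordiv s 10, PySem.Int.mod s 10].dropWhile (· == 0)

-- per-candidate correspondence between A's r-string (before/after the strip) and the digit list
abbrev pvQ (m s : Int) : Prop :=
  (pvRA (PySem.Int.toChars m) (PySem.Int.toChars s)).length ≤ 4
  ∧ (pvRA (PySem.Int.toChars m) (PySem.Int.toChars s)).dropWhile (· == '0')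
      = (pvDigitsB m s).map pvDigitChar
  ∧ (¬ (m = 0 ∧ s = 0) → pvDigitsB m s ≠ [])
  ∧ ∀ d ∈ pvDigitsB m s, 0 ≤ d ∧ d ≤ 9

set_option maxRecDepth 4000 in
set_option maxHeartbeats 1600000 in
lemma pvQ_all : ∀ a : Nat, a < 100 → ∀ b : Nat, b < 100 → pvQ (a : Int) (b : Int) := by decide

lemma pvQ_of (m s : Int) (hm0 : 0 ≤ m) (hm9 : m ≤ 99) (hs0 : 0 ≤ s) (hs9 : s ≤ 99) : pvQ m s := by
  have := pvQ_all m.toNat (by omega) s.toNat (by omega)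
  rwa [Int.toNat_of_nonneg hm0, Int.toNat_of_nonneg hs0] at this

set_option maxRecDepth 2000 in
lemma toCharsLen : ∀ b : Nat, b < 100 → 1 ≤ (PySem.Int.toChars (b : Int)).length ∧ (PySem.Int.toChars (b : Int)).length ≤ 2 := by decide

lemma toCharsLen_int (s : Int) (hs0 : 0 ≤ s) (hs9 : s ≤ 99) :
    1 ≤ (PySem.Int.toChars s).length ∧ (PySem.Int.toChars s).length ≤ 2 := by
  have := toCharsLen s.toNat (by omega)
  rwa [Int.toNat_of_nonneg hs0] at this

lemma len_rA (a b : List Char) (hb1 : 1 ≤ b.length) (hb2 : b.length ≤ 2) :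
    (pvRA a b).length = a.length + 2 := by
  unfold pvRA
  split_ifs with h1 h2
  · simp
  · simp [List.length_append, h2]
  · have hb : b.length = 2 := by
      rcases Nat.lt_or_ge b.length 2 with h | h
      · exfalso; apply h1
        have : b.length = 1 := by omega
        obtain ⟨c, hc⟩ := List.length_eq_one_iff.mp this
        exact absurd this h2
      · omega
    simp [List.length_append, hb]

lemma foldl_bodyA_true (ts : Int) (l : List Int) (nums : List (List Char)) :
    l.foldl (pvBodyA ts) (nums, true) = (nums, true) := by
  induction l with
  | nil => rfl
  | cons i l ih => simpa [pvBodyA] using ih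

lemma bodyA_false (ts : Int) (nums : List (List Char)) (i : Int) :
    pvBodyA ts (nums, false) i =
      if ts - i * 60 < 100 then
        (if (pvRA (PySem.Int.toChars i) (PySem.Int.toChars (ts - i * 60))).length ≤ 4
         then (nums ++ [(pvRA (PySem.Int.toChars i) (PySem.Int.toChars (ts - i * 60))).dropWhile (· == '0')], false)
         else (nums, false))
      else (nums, true) := by
  simp [pvBodyA]

lemma foldl_bodyA_far (ts : Int) (l : List Int) (h : ∀ i ∈ l, 100 ≤ ts - i * 60)
    (nums : List (List Char)) : (l.foldl (pvBodyA ts) (nums, false)).1 = nums := by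
  cases l with
  | nil => rfl
  | cons i l =>
    have hi := h i (by simp)
    simp only [List.foldl_cons, bodyA_false]
    rw [if_neg (by omega)]
    rw [foldl_bodyA_true]

-- list of candidate pairs (m, s), in the order A's descending loop produces them
def pvCands (ts : Int) : List (Int × Int) :=
  (if 0 ≤ PySem.Int.floordiv ts 60 ∧ PySem.Int.floordiv ts 60 ≤ 99
   then [(PySem.Int.floordiv ts 60, PySem.Int.mod ts 60)] else []) ++
  (if PySem.Int.mod ts 60 < 40 ∧ 0 ≤ PySem.Int.floordiv ts 60 - 1
      ∧ PySem.Int.floordiv ts 60 - 1 ≤ 99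
   then [(PySem.Int.floordiv ts 60 - 1, PySem.Int.mod ts 60 + 60)] else [])

lemma nums_eq (ts : Int) (h1 : 1 ≤ ts) (h2 : ts ≤ 6039) :
    pvBuildNumsA ts = (pvCands ts).map (fun c => (pvDigitsB c.1 c.2).map pvDigitChar) := by
  have hfd : PySem.Int.floordiv ts 60 = ts / 60 := PySem.Int.floordiv_eq_ediv_of_pos (by norm_num)
  have hmd : PySem.Int.mod ts 60 = ts % 60 := PySem.Int.mod_eq_emod_of_pos (by norm_num)
  unfold pvBuildNumsA pvCands
  rw [hfd, hmd]
  generalize hM : ts / 60 = M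
  generalize hS : ts % 60 = ss
  have hM0 : 0 ≤ M := by omega
  have hM100 : M ≤ 100 := by omega
  have hss0 : 0 ≤ ss := by omega
  have hss60 : ss < 60 := by omega
  have hts : ts = 60 * M + ss := by omega
  have hlast : M = 100 → ss ≤ 39 := by omega
  by_cases hc : M ≤ 99
  · rcases eq_or_lt_of_le hM0 with h0 | hpos
    · rw [← h0]
      rw [show PySem.List.pyRange 0 (-1) (-1) = [0] from by decide]
      simp only [List.foldl_cons, List.foldl_nil, bodyA_false]
      rw [show ts - 0 * 60 = ss from by omega]
      obtain ⟨hlen, hstrip, _, _⟩ := pvQ_of 0 ss (by omega) (by omega) hss0 (by omega)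
      rw [if_pos (show ss < 100 by omega), if_pos hlen]
      rw [if_pos (show (0:Int) ≤ 0 ∧ (0:Int) ≤ 99 by omega)]
      rw [if_neg (show ¬ (ss < 40 ∧ 0 ≤ (0:Int) - 1 ∧ (0:Int) - 1 ≤ 99) by omega)]
      simp [hstrip]
    · rw [PySem.List.pyRange_neg_one_cons (by omega), PySem.List.pyRange_neg_one_cons (by omega)]
      simp only [List.foldl_cons, bodyA_false]
      rw [show ts - M * 60 = ss from by omega]
      obtain ⟨hlen1, hstrip1, _, _⟩ := pvQ_of M ss hM0 hc hss0 (by omega)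
      rw [if_pos (show ss < 100 by omega), if_pos hlen1]
      rw [bodyA_false, show ts - (M - 1) * 60 = ss + 60 from by omega]
      by_cases h40 : ss < 40
      · obtain ⟨hlen2, hstrip2, _, _⟩ := pvQ_of (M - 1) (ss + 60) (by omega) (by omega) (by omega) (by omega)
        rw [if_pos (show ss + 60 < 100 by omega), if_pos hlen2]
        rw [foldl_bodyA_far ts _ (by
          intro i hi
          rw [PySem.List.mem_pyRange_neg_one] at hi
          omega)]
        rw [if_pos (show 0 ≤ M ∧ M ≤ 99 from ⟨hM0, hc⟩)]
        rw [if_pos (show ss < 40 ∧ 0 ≤ M - 1 ∧ M - 1 ≤ 99 by omega)]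
        simp [hstrip1, hstrip2]
      · rw [if_neg (by omega)]
        rw [foldl_bodyA_true]
        rw [if_pos (show 0 ≤ M ∧ M ≤ 99 from ⟨hM0, hc⟩)]
        rw [if_neg (show ¬ (ss < 40 ∧ 0 ≤ M - 1 ∧ M - 1 ≤ 99) by omega)]
        simp [hstrip1]
  · have hM' : M = 100 := by omega
    subst hM'
    have hss39 : ss ≤ 39 := hlast rfl
    rw [show PySem.List.pyRange 100 (-1) (-1) = 100 :: 99 :: PySem.List.pyRange 98 (-1) (-1) from by
      rw [PySem.List.pyRange_neg_one_cons (by norm_num), PySem.List.pyRange_neg_one_cons (by norm_num)]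
      norm_num]
    simp only [List.foldl_cons, bodyA_false]
    rw [show ts - 100 * 60 = ss from by omega]
    have hlen5 : (pvRA (PySem.Int.toChars 100) (PySem.Int.toChars ss)).length = 5 := by
      obtain ⟨hb1, hb2⟩ := toCharsLen_int ss hss0 (by omega)
      rw [len_rA _ _ hb1 hb2]
      rw [show PySem.Int.toChars (100 : Int) = ['1', '0', '0'] from by decide]
      rfl
    rw [if_pos (show ss < 100 by omega), if_neg (by omega)]
    rw [bodyA_false, show ts - 99 * 60 = ss + 60 from by omega]
    obtain ⟨hlen2, hstrip2, _, _⟩ := pvQ_of 99 (ss + 60) (by omega) (by omega) (by omega) (by omega)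
    rw [if_pos (show ss + 60 < 100 by omega), if_pos hlen2]
    rw [foldl_bodyA_far ts _ (by
      intro i hi
      rw [PySem.List.mem_pyRange_neg_one] at hi
      omega)]
    rw [if_neg (show ¬ ((0:Int) ≤ 100 ∧ (100:Int) ≤ 99) by omega)]
    rw [if_pos (show ss < 40 ∧ 0 ≤ (100:Int) - 1 ∧ (100:Int) - 1 ≤ 99 by omega)]
    simp [hstrip2]

lemma ofChars_digitChar (d : Int) (h0 : 0 ≤ d) (h9 : d ≤ 9) :
    (PySem.Int.ofChars? [pvDigitChar d]).getD 0 = d := by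
  interval_cases d <;> decide

lemma digitChar_inj (a b : Int) (ha0 : 0 ≤ a) (ha9 : a ≤ 9) (hb0 : 0 ≤ b) (hb9 : b ≤ 9) :
    (pvDigitChar a = pvDigitChar b) ↔ a = b := by
  interval_cases a <;> interval_cases b <;> simp [pvDigitChar]

lemma changes_cons (prev d : Int) (rest : List Int) :
    pvChangesB prev (d :: rest) = (if prev = d then 0 else 1) + pvChangesB d rest := by
  simp only [pvChangesB, List.zip_cons_cons, List.countP_cons]
  by_cases h : prev = d
  · simp [h]
  · simp [bne_iff_ne, Ne, h]
    push_cast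
    ring

lemma changes_nil (prev : Int) : pvChangesB prev [] = 0 := by
  simp [pvChangesB]

-- A's accumulated tail cost equals the closed count over adjacent pairs
lemma tail_formula (mc pc : Int) :
    ∀ (rest : List Int) (d : Int), 0 ≤ d → d ≤ 9 → (∀ x ∈ rest, 0 ≤ x ∧ x ≤ 9) →
    pvCostTailA mc pc ((d :: rest).map pvDigitChar)
      = pc * (rest.length : Int) + mc * pvChangesB d rest := by
  intro rest
  induction rest with
  | nil => intro d _ _ _; simp [pvCostTailA, changes_nil]
  | cons e rest ih =>
    intro d hd0 hd9 hmem
    obtain ⟨he0, he9⟩ := hmem e (by simp)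
    have hmem' : ∀ x ∈ rest, 0 ≤ x ∧ x ≤ 9 := fun x hx => hmem x (by simp [hx])
    have ihe := ih e he0 he9 hmem'
    simp only [List.map_cons] at ihe ⊢
    simp only [pvCostTailA]
    rw [ihe, changes_cons]
    have hiff : (pvDigitChar d = pvDigitChar e) ↔ (d = e) :=
      digitChar_inj d e hd0 hd9 he0 he9
    by_cases h : d = e
    · rw [if_pos (hiff.mpr h), if_pos h]
      push_cast [List.length_cons]; ring
    · rw [if_neg (fun hc => h (hiff.mp hc)), if_neg h]
      push_cast [List.length_cons]; ring

-- full cost bridge: A's cost on the digit string = B's closed formula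
lemma cost_bridge (sa mc pc : Int) (ds : List Int) (hne : ds ≠ [])
    (hb : ∀ d ∈ ds, 0 ≤ d ∧ d ≤ 9) :
    pvCostA sa mc pc (ds.map pvDigitChar)
      = pc * (ds.length : Int) + mc * pvChangesB sa ds := by
  cases ds with
  | nil => exact absurd rfl hne
  | cons d rest =>
    obtain ⟨hd0, hd9⟩ := hb d (by simp)
    have hrest : ∀ x ∈ rest, 0 ≤ x ∧ x ≤ 9 := fun x hx => hb x (by simp [hx])
    have htail := tail_formula mc pc rest d hd0 hd9 hrest
    simp only [List.map_cons] at htail ⊢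
    simp only [pvCostA]
    simp only [ofChars_digitChar d hd0 hd9]
    rw [htail, changes_cons]
    by_cases h : sa = d
    · rw [if_pos h, if_pos h]
      push_cast [List.length_cons]; ring
    · rw [if_neg h, if_neg h]
      push_cast [List.length_cons]; ring

-- candidate facts needed for the bridge (nonempty, digit bounds)
lemma cands_facts (ts : Int) (h1 : 1 ≤ ts) (h2 : ts ≤ 6039) :
    ∀ c ∈ pvCands ts, pvDigitsB c.1 c.2 ≠ [] ∧ ∀ d ∈ pvDigitsB c.1 c.2, 0 ≤ d ∧ d ≤ 9 := by
  have hfd : PySem.Int.floordiv ts 60 = ts / 60 := PySem.Int.floordiv_eq_ediv_of_pos (by norm_num)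
  have hmd : PySem.Int.mod ts 60 = ts % 60 := PySem.Int.mod_eq_emod_of_pos (by norm_num)
  unfold pvCands
  rw [hfd, hmd]
  generalize hM : ts / 60 = M
  generalize hS : ts % 60 = ss
  have hss0 : 0 ≤ ss := by omega
  have hss60 : ss < 60 := by omega
  have hts : ts = 60 * M + ss := by omega
  intro c hcmem
  rcases List.mem_append.mp hcmem with h | h
  · by_cases hc : 0 ≤ M ∧ M ≤ 99
    · rw [if_pos hc] at h
      simp only [List.mem_singleton] at h
      subst h
      obtain ⟨_, _, hne, hbnd⟩ := pvQ_of M ss hc.1 hc.2 hss0 (by omega)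
      exact ⟨hne (by omega), hbnd⟩
    · rw [if_neg hc] at h
      simp at h
  · by_cases hc : ss < 40 ∧ 0 ≤ M - 1 ∧ M - 1 ≤ 99
    · rw [if_pos hc] at h
      simp only [List.mem_singleton] at h
      subst h
      obtain ⟨_, _, hne, hbnd⟩ := pvQ_of (M - 1) (ss + 60) hc.2.1 hc.2.2 (by omega) (by omega)
      exact ⟨hne (by omega), hbnd⟩
    · rw [if_neg hc] at h
      simp at h

-- B-side: a stretch of the range containing no matching display is skipped
lemma foldl_bodyB_skip (sa mc pc ts : Int) (l : List Int)
    (h : ∀ n ∈ l, ¬ (n / 100 * 60 + n % 100 = ts)) (acc : Option Int) :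
    l.foldl (pvBodyB sa mc pc ts) acc = acc := by
  induction l generalizing acc with
  | nil => rfl
  | cons n l ih =>
    have hn := h n (by simp)
    simp only [List.foldl_cons, pvBodyB,
      PySem.Int.floordiv_eq_ediv_of_pos (show (0:Int) < 100 by norm_num),
      PySem.Int.mod_eq_emod_of_pos (show (0:Int) < 100 by norm_num)]
    rw [if_neg hn]
    exact ih (fun x hx => h x (by simp [hx])) acc

-- B's per-hit step, written over the candidate pair
lemma bodyB_hit (sa mc pc ts m s : Int) (hm0 : 0 ≤ m) (hm9 : m ≤ 99)
    (hs0 : 0 ≤ s) (hs9 : s ≤ 99) (hts : 60 * m + s = ts) (acc : Option Int) :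
    pvBodyB sa mc pc ts acc (100 * m + s)
      = (let c := pc * ((pvDigitsB m s).length : Int) + mc * pvChangesB sa (pvDigitsB m s)
         match acc with
         | none => some c
         | some b => if c < b then some c else some b) := by
  have hdig : pvDigits4 (100 * m + s) = pvDigitsB m s := by
    unfold pvDigits4 pvDigitsB
    simp only [PySem.Int.floordiv_eq_ediv_of_pos (show (0:Int) < 1000 by norm_num),
      PySem.Int.floordiv_eq_ediv_of_pos (show (0:Int) < 100 by norm_num),
      PySem.Int.floordiv_eq_ediv_of_pos (show (0:Int) < 10 by norm_num),
      PySem.Int.mod_eq_emod_of_pos (show (0:Int) < 10 by norm_num)]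
    rw [show (100 * m + s) / 1000 = m / 10 from by omega,
        show (100 * m + s) / 100 % 10 = m % 10 from by omega,
        show (100 * m + s) / 10 % 10 = s / 10 from by omega,
        show (100 * m + s) % 10 = s % 10 from by omega]
  simp only [pvBodyB,
    PySem.Int.floordiv_eq_ediv_of_pos (show (0:Int) < 100 by norm_num),
    PySem.Int.mod_eq_emod_of_pos (show (0:Int) < 100 by norm_num)]
  rw [if_pos (by omega), hdig]

-- A's option-min fold in closed form
lemma foldl_optmin_some {α : Type} (f : α → Int) (xs : List α) :
    ∀ v, xs.foldl (fun (acc : Option Int) r =>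
        match acc with
        | none => some (f r)
        | some v => some (min v (f r))) (some v)
      = some ((xs.map f).foldl min v) := by
  induction xs with
  | nil => intro v; simp
  | cons x xs ih => intro v; simpa using ih (min v (f x))

lemma foldl_optmin_cons {α : Type} (f : α → Int) (y : α) (t : List α) :
    (y :: t).foldl (fun (acc : Option Int) r =>
        match acc with
        | none => some (f r)
        | some v => some (min v (f r))) none
      = some ((t.map f).foldl min (f y)) := by
  simpa using foldl_optmin_some f t (f y)

-- ===== VERDICT (by name: the statement is the Claim_ definition above) =====
theorem minCostSetTime_spec : Claim_equal_minCostSetTime := by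
  intro sa mc pc ts _ hpre
  obtain ⟨h1, h2⟩ := hpre
  have hnums := nums_eq ts h1 h2
  have hfacts := cands_facts ts h1 h2
  unfold Spec_minCostSetTime minCostSetTime minCostSetTime_alt
  rw [hnums]
  -- the closed cost of a candidate pair
  set cB : Int × Int → Int := fun c =>
    pc * ((pvDigitsB c.1 c.2).length : Int) + mc * pvChangesB sa (pvDigitsB c.1 c.2) with hcB
  have hcost : ∀ x ∈ pvCands ts,
      pvCostA sa mc pc ((pvDigitsB x.1 x.2).map pvDigitChar) = cB x := by
    intro x hx
    obtain ⟨hxe, hxb⟩ := hfacts x hx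
    exact cost_bridge sa mc pc _ hxe hxb
  -- name M and ss
  have hfd : PySem.Int.floordiv ts 60 = ts / 60 := PySem.Int.floordiv_eq_ediv_of_pos (by norm_num)
  have hmd : PySem.Int.mod ts 60 = ts % 60 := PySem.Int.mod_eq_emod_of_pos (by norm_num)
  have hcands : pvCands ts =
      (if 0 ≤ ts / 60 ∧ ts / 60 ≤ 99 then [(ts / 60, ts % 60)] else []) ++
      (if ts % 60 < 40 ∧ 0 ≤ ts / 60 - 1 ∧ ts / 60 - 1 ≤ 99
       then [(ts / 60 - 1, ts % 60 + 60)] else []) := by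
    unfold pvCands; rw [hfd, hmd]
  generalize hM : ts / 60 = M at hcands
  generalize hS : ts % 60 = ss at hcands
  have hM0 : 0 ≤ M := by omega
  have hM100 : M ≤ 100 := by omega
  have hss0 : 0 ≤ ss := by omega
  have hss60 : ss < 60 := by omega
  have hts : ts = 60 * M + ss := by omega
  -- the two possible display numbers
  have hsplit : ∀ n : Int, 0 ≤ n → n < 10000 → (n / 100 * 60 + n % 100 = ts ↔
      (n = 100 * M + ss ∧ M ≤ 99) ∨ (n = 100 * (M - 1) + (ss + 60) ∧ ss < 40 ∧ 1 ≤ M)) := by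
    intro n hn0 hn1; omega
  by_cases hcM : M ≤ 99
  · by_cases hc2 : ss < 40 ∧ 1 ≤ M
    · -- two candidates; B visits them in ascending order n1 < n2
      set n1 : Int := 100 * (M - 1) + (ss + 60) with hn1
      set n2 : Int := 100 * M + ss with hn2
      have hlt : n1 < n2 := by omega
      have hn1r : (0:Int) ≤ n1 ∧ n1 < 10000 := by omega
      have hn2r : (0:Int) ≤ n2 ∧ n2 < 10000 := by omega
      rw [hcands, if_pos ⟨hM0, hcM⟩, if_pos (by omega)]
      simp only [List.cons_append, List.nil_append, List.map_cons, List.map_nil]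
      rw [foldl_optmin_cons]
      simp only [List.map_cons, List.map_nil, List.foldl_cons, List.foldl_nil]
      rw [hcost (M, ss) (by rw [hcands]; simp [hc2.1]; omega),
          hcost (M - 1, ss + 60) (by rw [hcands]; simp [hc2.1]; omega)]
      -- B side
      rw [show PySem.List.pyRange 0 10000 1
            = PySem.List.pyRange 0 n1 1 ++ n1 :: (PySem.List.pyRange (n1+1) n2 1 ++ n2 :: PySem.List.pyRange (n2+1) 10000 1) from by
        rw [PySem.List.pyRange_one_append 0 n1 10000 (by omega) (by omega),
            PySem.List.pyRange_one_cons (show n1 < 10000 by omega),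
            PySem.List.pyRange_one_append (n1+1) n2 10000 (by omega) (by omega),
            PySem.List.pyRange_one_cons (show n2 < 10000 by omega)]]
      rw [List.foldl_append]
      rw [foldl_bodyB_skip sa mc pc ts (PySem.List.pyRange 0 n1 1) (by
        intro n hn
        rw [PySem.List.mem_pyRange_one] at hn
        intro hc
        rcases (hsplit n (by omega) (by omega)).mp hc with ⟨h, _⟩ | ⟨h, _⟩ <;> omega) none]
      rw [List.foldl_cons]
      rw [show (n1 : Int) = 100 * (M - 1) + (ss + 60) from rfl] -- keep shape
      rw [bodyB_hit sa mc pc ts (M - 1) (ss + 60) (by omega) (by omega) (by omega) (by omega) (by omega)]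
      rw [List.foldl_append]
      rw [foldl_bodyB_skip sa mc pc ts (PySem.List.pyRange (n1 + 1) n2 1) (by
        intro n hn
        rw [PySem.List.mem_pyRange_one] at hn
        intro hc
        rcases (hsplit n (by omega) (by omega)).mp hc with ⟨h, _⟩ | ⟨h, _⟩ <;> omega)]
      rw [List.foldl_cons]
      rw [show n2 = 100 * M + ss from rfl]
      rw [bodyB_hit sa mc pc ts M ss (by omega) (by omega) (by omega) (by omega) (by omega)]
      rw [foldl_bodyB_skip sa mc pc ts (PySem.List.pyRange (n2 + 1) 10000 1) (by
        intro n hn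
        rw [PySem.List.mem_pyRange_one] at hn
        intro hc
        rcases (hsplit n (by omega) (by omega)).mp hc with ⟨h, _⟩ | ⟨h, _⟩ <;> omega)]
      -- both sides are now closed expressions in cB (M,ss) and cB (M-1,ss+60)
      simp [hcB, min_def]
      split_ifs <;> simp <;> omega
    · -- single candidate (M, ss)
      set n2 : Int := 100 * M + ss with hn2
      rw [hcands, if_pos ⟨hM0, hcM⟩, if_neg (by omega)]
      simp only [List.append_nil, List.map_cons, List.map_nil]
      rw [foldl_optmin_cons]
      simp only [List.map_nil, List.foldl_nil]
      rw [hcost (M, ss) (by rw [hcands]; simp; omega)]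
      rw [show PySem.List.pyRange 0 10000 1
            = PySem.List.pyRange 0 n2 1 ++ n2 :: PySem.List.pyRange (n2+1) 10000 1 from by
        rw [PySem.List.pyRange_one_append 0 n2 10000 (by omega) (by omega),
            PySem.List.pyRange_one_cons (show n2 < 10000 by omega)]]
      rw [List.foldl_append]
      rw [foldl_bodyB_skip sa mc pc ts (PySem.List.pyRange 0 n2 1) (by
        intro n hn
        rw [PySem.List.mem_pyRange_one] at hn
        intro hc
        rcases (hsplit n (by omega) (by omega)).mp hc with ⟨h, _⟩ | ⟨h, hx⟩
        · omega
        · omega) none]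
      rw [List.foldl_cons]
      rw [show n2 = 100 * M + ss from rfl]
      rw [bodyB_hit sa mc pc ts M ss (by omega) (by omega) (by omega) (by omega) (by omega)]
      rw [foldl_bodyB_skip sa mc pc ts (PySem.List.pyRange (n2 + 1) 10000 1) (by
        intro n hn
        rw [PySem.List.mem_pyRange_one] at hn
        intro hc
        rcases (hsplit n (by omega) (by omega)).mp hc with ⟨h, _⟩ | ⟨h, hx⟩
        · omega
        · omega)]
  · -- M = 100: single candidate (99, ss + 60)
    have hM' : M = 100 := by omega
    have hss39 : ss ≤ 39 := by omega
    set n1 : Int := 100 * (M - 1) + (ss + 60) with hn1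
    rw [hcands, if_neg (by omega), if_pos (by omega)]
    simp only [List.nil_append, List.map_cons, List.map_nil]
    rw [foldl_optmin_cons]
    simp only [List.map_nil, List.foldl_nil]
    rw [hcost (M - 1, ss + 60) (by rw [hcands]; simp; omega)]
    rw [show PySem.List.pyRange 0 10000 1
          = PySem.List.pyRange 0 n1 1 ++ n1 :: PySem.List.pyRange (n1+1) 10000 1 from by
      rw [PySem.List.pyRange_one_append 0 n1 10000 (by omega) (by omega),
          PySem.List.pyRange_one_cons (show n1 < 10000 by omega)]]
    rw [List.foldl_append]
    rw [foldl_bodyB_skip sa mc pc ts (PySem.List.pyRange 0 n1 1) (by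
      intro n hn
      rw [PySem.List.mem_pyRange_one] at hn
      intro hc
      rcases (hsplit n (by omega) (by omega)).mp hc with ⟨h, hx⟩ | ⟨h, _⟩
      · omega
      · omega) none]
    rw [List.foldl_cons]
    rw [show n1 = 100 * (M - 1) + (ss + 60) from rfl]
    rw [bodyB_hit sa mc pc ts (M - 1) (ss + 60) (by omega) (by omega) (by omega) (by omega) (by omega)]
    rw [foldl_bodyB_skip sa mc pc ts (PySem.List.pyRange (n1 + 1) 10000 1) (by
      intro n hn
      rw [PySem.List.mem_pyRange_one] at hn
      intro hc
      rcases (hsplit n (by omega) (by omega)).mp hc with ⟨h, hx⟩ | ⟨h, _⟩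
      · omega
      · omega)]
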